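-- pv_equiv track=rewrite | github.com/qlalfdmlghk1/Algorism_Python | programers/풀어보기/지게차와 크레인.py | solution
-- ===== SOURCE A (Python) =====
-- import copy
--
-- def solution(storage, requests):
--     n,m = len(storage),len(storage[0])
--     board = []
--     for st in storage :
--         li = []
--         for s in st :
--             li.append(s)
--         board.append(li)
--
--     # 외부와 연결되어 있는지 RETURN 하는 함수
--     def check_border(r,c,cur_board) :
--         dr = [1,-1,0,0]
--         dc = [0,0,1,-1]
--         if r == 0 or c == 0 or r == n-1 or c == m-1 :
--             return True
--         for i in range(4) :
--             nex_r = r + dr[i]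
--             nex_c = c + dc[i]
--             if 0 <= nex_r < n and 0 <= nex_c < m :
--                 if cur_board[nex_r][nex_c] == 0 :
--                     return True
--         return False
--
--     for request in requests :
--         for i in range(n) :
--             for j in range(m) :
--                 if board[i][j] == -1 :
--                     if check_border(i,j,board) :
--                         board[i][j] = 0
--         cur_board = copy.deepcopy(board)
--
--         # 지게차
--         if len(request) == 1 :
--             for i in range(n) :
--                 for j in range(m) :
--                     if board[i][j] == request and check_border(i,j,cur_board) :
--                         board[i][j] = 0
--
--         # 크레인
--         else :
--             request = request[0]
--             for i in range(n) :
--                 for j in range(m) :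
--                     if board[i][j] == request :
--                         if check_border(i,j,cur_board) :
--                             board[i][j] = 0
--                         else :
--                             board[i][j] = -1
--
--     answer = n * m
--     for st in board :
--         answer -= st.count(0)
--         answer -= st.count(-1)
--
--     return answer
-- ===== SOURCE B (Python) =====
-- def solution(storage, requests):
--     n, m = len(storage), len(storage[0])
--     index = {}
--     for i, row in enumerate(storage):
--         for j, ch in enumerate(row[:m]):
--             index.setdefault(ch, []).append((i, j))
--     zeros, minus = set(), set()
--
--     def exposed(r, c, z):
--         if r == 0 or c == 0 or r == n - 1 or c == m - 1:
--             return True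
--         return ((r + 1, c) in z or (r - 1, c) in z
--                 or (r, c + 1) in z or (r, c - 1) in z)
--
--     for request in requests:
--         for p in sorted(minus, key=lambda p: p[0] * m + p[1]):  # row-major scan order
--             if exposed(p[0], p[1], zeros):
--                 minus.discard(p)
--                 zeros.add(p)
--         snapshot = frozenset(zeros)
--         if len(request) == 1:
--             for p in index.get(request, []):
--                 if p not in zeros and p not in minus and exposed(p[0], p[1], snapshot):
--                     zeros.add(p)
--         else:
--             for p in index.get(request[0], []):
--                 if p not in zeros and p not in minus:
--                     if exposed(p[0], p[1], snapshot):
--                         zeros.add(p)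
--                     else:
--                         minus.add(p)
--     return n * m - len(zeros) - len(minus)
-- ===== Notes on version B (the rewrite author's own statement) =====
-- stated objective: faster
-- what changed: B replaces A's per-request full-grid rescans and board deepcopy with incremental bookkeeping: a per-character position index built once plus sets of removed (0) and pending (-1) positions, so each request touches only the pending positions and the positions of the requested character instead of all n*m cells.
import Mathlib
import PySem

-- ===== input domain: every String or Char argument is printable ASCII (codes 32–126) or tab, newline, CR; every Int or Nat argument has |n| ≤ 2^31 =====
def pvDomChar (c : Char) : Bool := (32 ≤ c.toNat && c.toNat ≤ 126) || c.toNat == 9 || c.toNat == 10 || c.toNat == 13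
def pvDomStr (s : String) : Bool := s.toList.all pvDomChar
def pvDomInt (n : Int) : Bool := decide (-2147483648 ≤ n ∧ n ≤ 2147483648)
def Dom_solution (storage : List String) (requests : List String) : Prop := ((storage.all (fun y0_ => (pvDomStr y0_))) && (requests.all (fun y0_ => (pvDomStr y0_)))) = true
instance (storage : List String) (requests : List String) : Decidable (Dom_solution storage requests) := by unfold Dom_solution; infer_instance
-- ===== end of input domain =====

-- B drops A's per-request full-grid rescans and deepcopy: it keeps a per-character position
-- index plus sets of removed (0) and pending (-1) positions and touches only affected cells.

-- ===== PORT A =====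
-- board cells: a character, the int 0 (removed), or the int -1 (pending crane removal)
inductive PCell where
  | ch : Char → PCell
  | zero : PCell
  | neg : PCell
deriving DecidableEq, Repr

-- board[i][j] (total form; all uses are in range under Pre_)
def pvGet2 (b : List (List PCell)) (i j : Int) : PCell :=
  PySem.List.pyGetD (PySem.List.pyGetD b i []) j (PCell.ch ' ')

-- board[i][j] = v
def pvSet2 (b : List (List PCell)) (i j : Int) (v : PCell) : List (List PCell) :=
  PySem.List.pySetD b i (PySem.List.pySetD (PySem.List.pyGetD b i []) j v)

-- A's check_border
def pvACheck (n m r c : Int) (cur : List (List PCell)) : Bool :=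
  let dr : List Int := [1, -1, 0, 0]
  let dc : List Int := [0, 0, 1, -1]
  if r = 0 ∨ c = 0 ∨ r = n - 1 ∨ c = m - 1 then true
  else (PySem.List.pyRange 0 4 1).any (fun i =>
    let nr := r + PySem.List.pyGetD dr i 0
    let nc := c + PySem.List.pyGetD dc i 0
    decide (0 ≤ nr ∧ nr < n ∧ 0 ≤ nc ∧ nc < m) &&
      (pvGet2 cur nr nc == PCell.zero))

-- Python's 'cell == request' where cell is a board entry and request a string
def pvCellEqStr (cell : PCell) (s : String) : Bool :=
  match cell with
  | .ch c => s.toList == [c]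
  | _ => false

def solution (storage : List String) (requests : List String) : Int :=
  let n : Int := PySem.List.len storage
  let m : Int := PySem.Str.len (PySem.List.pyGetD storage 0 "")
  let board : List (List PCell) :=
    storage.foldl (fun b st =>
      b ++ [st.toList.foldl (fun li s => li ++ [PCell.ch s]) []]) []
  let board := requests.foldl (fun board request =>
    let board := (PySem.List.pyRange 0 n 1).foldl (fun bd i =>
      (PySem.List.pyRange 0 m 1).foldl (fun bd j =>
        if pvGet2 bd i j == PCell.neg then
          if pvACheck n m i j bd then pvSet2 bd i j PCell.zero else bd
        else bd) bd) board
    let cur := board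
    if PySem.Str.len request = 1 then
      (PySem.List.pyRange 0 n 1).foldl (fun bd i =>
        (PySem.List.pyRange 0 m 1).foldl (fun bd j =>
          if pvCellEqStr (pvGet2 bd i j) request then
            if pvACheck n m i j cur then pvSet2 bd i j PCell.zero else bd
          else bd) bd) board
    else
      let request := String.ofList [(PySem.Str.pyGet? request 0).getD ' ']
      (PySem.List.pyRange 0 n 1).foldl (fun bd i =>
        (PySem.List.pyRange 0 m 1).foldl (fun bd j =>
          if pvCellEqStr (pvGet2 bd i j) request then
            if pvACheck n m i j cur then pvSet2 bd i j PCell.zero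
            else pvSet2 bd i j PCell.neg
          else bd) bd) board) board
  board.foldl (fun a st =>
    a - (PySem.List.count st PCell.zero : Int) - (PySem.List.count st PCell.neg : Int)) (n * m)

-- ===== PORT B =====
-- B's 'exposed': on the border, or some neighbour already removed (in z)
def pvExposed (n m r c : Int) (z : PySem.Set (Int × Int)) : Bool :=
  if r = 0 ∨ c = 0 ∨ r = n - 1 ∨ c = m - 1 then true
  else PySem.Set.contains z (r + 1, c) || PySem.Set.contains z (r - 1, c) ||
       PySem.Set.contains z (r, c + 1) || PySem.Set.contains z (r, c - 1)

def solution_alt (storage : List String) (requests : List String) : Int :=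
  let n : Int := PySem.List.len storage
  let m : Int := PySem.Str.len (PySem.List.pyGetD storage 0 "")
  let index : PySem.Dict Char (List (Int × Int)) :=
    (PySem.List.enumerate storage 0).foldl (fun d pr =>
      (PySem.List.enumerate (PySem.List.slice pr.2.toList none (some m)) 0).foldl
        (fun d q => PySem.Dict.modify d q.2 [] (fun l => l ++ [(pr.1, q.1)])) d)
      PySem.Dict.empty
  let zm : PySem.Set (Int × Int) × PySem.Set (Int × Int) :=
    requests.foldl (fun zm request =>
      let zm := (PySem.List.sorted zm.2 (fun p => p.1 * m + p.2) false).foldl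
        (fun (s : PySem.Set (Int × Int) × PySem.Set (Int × Int)) p =>
          if pvExposed n m p.1 p.2 s.1 then (PySem.Set.add s.1 p, PySem.Set.discard s.2 p)
          else s) zm
      let snapshot := zm.1
      if PySem.Str.len request = 1 then
        ((PySem.Dict.getD index (request.toList.headD ' ') []).foldl (fun z p =>
          if ¬ PySem.Set.contains z p ∧ ¬ PySem.Set.contains zm.2 p ∧
              pvExposed n m p.1 p.2 snapshot
          then PySem.Set.add z p else z) zm.1, zm.2)
      else
        (PySem.Dict.getD index ((PySem.Str.pyGet? request 0).getD ' ') []).foldl (fun s p =>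
          if ¬ PySem.Set.contains s.1 p ∧ ¬ PySem.Set.contains s.2 p then
            if pvExposed n m p.1 p.2 snapshot then (PySem.Set.add s.1 p, s.2)
            else (s.1, PySem.Set.add s.2 p)
          else s) zm)
      (PySem.Set.empty, PySem.Set.empty)
  n * m - PySem.Set.len zm.1 - PySem.Set.len zm.2

-- ===== PRECONDITION & SPEC =====
-- Pre_ is exactly the set of inputs where A returns: A raises IndexError on empty storage,
-- and, when requests is nonempty, on any row shorter than the first row or any empty request.
def Pre_solution (storage : List String) (requests : List String) : Prop :=
  storage ≠ [] ∧
    (requests = [] ∨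
      ((∀ s ∈ storage, (storage.headD "").toList.length ≤ s.toList.length) ∧
       ∀ r ∈ requests, r ≠ ""))
instance (storage : List String) (requests : List String) : Decidable (Pre_solution storage requests) := by
  unfold Pre_solution; infer_instance

def pvWitness_solution : List String × List String := (["AB", "BA"], ["A", "BB"])


def Spec_solution (storage : List String) (requests : List String) (out : Int) : Prop :=
  out = solution_alt storage requests
instance (storage : List String) (requests : List String) (out : Int) : Decidable (Spec_solution storage requests out) := by
  unfold Spec_solution; infer_instance

-- ===== CLAIM (what is proved, stated in full; the proofs are below) =====
def Claim_equal_solution : Prop := ∀ (storage : List String) (requests : List String),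
  Dom_solution storage requests → Pre_solution storage requests →
    Spec_solution storage requests (solution storage requests)



-- ===== LEMMAS AND PROOFS =====

-- board width (length of the first row)
def pvM (S : List String) : Nat := (S.headD "").toList.length

def pvInGrid (S : List String) (p : Int × Int) : Prop :=
  0 ≤ p.1 ∧ p.1 < (S.length : Int) ∧ 0 ≤ p.2 ∧ p.2 < ((pvM S : Nat) : Int)

def pvCharAt (S : List String) (p : Int × Int) : Char :=
  ((S.getD p.1.toNat "").toList).getD p.2.toNat ' '

def pvCellOf (S : List String) (Z M : List (Int × Int)) (p : Int × Int) : PCell :=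
  if p ∈ Z then .zero else if p ∈ M then .neg else .ch (pvCharAt S p)

def pvRowOf (S : List String) (Z M : List (Int × Int)) (k : Nat) : List PCell :=
  (List.range (pvM S)).map (fun j : Nat => pvCellOf S Z M ((k : Int), (j : Int)))
    ++ ((S.getD k "").toList.drop (pvM S)).map PCell.ch

def pvBoardOf (S : List String) (Z M : List (Int × Int)) : List (List PCell) :=
  (List.range S.length).map (pvRowOf S Z M)

def pvSInv (S : List String) (Z M : List (Int × Int)) : Prop :=
  Z.Nodup ∧ M.Nodup ∧ (∀ p ∈ Z, pvInGrid S p ∧ p ∉ M) ∧ (∀ p ∈ M, pvInGrid S p)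

def pvGrid (S : List String) : List (Int × Int) :=
  (PySem.List.pyRange 0 (S.length : Int) 1).flatMap
    (fun i => (PySem.List.pyRange 0 ((pvM S : Nat) : Int) 1).map (fun j => (i, j)))

-- the A-side one-request transform and the B-side one (same code as in the ports,
-- with the let-bound n, m, index made explicit parameters)
def pvAStep (n m : Int) : List (List PCell) → String → List (List PCell) := fun board request =>
  let board := (PySem.List.pyRange 0 n 1).foldl (fun bd i =>
    (PySem.List.pyRange 0 m 1).foldl (fun bd j =>
      if pvGet2 bd i j == PCell.neg then
        if pvACheck n m i j bd then pvSet2 bd i j PCell.zero else bd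
      else bd) bd) board
  let cur := board
  if PySem.Str.len request = 1 then
    (PySem.List.pyRange 0 n 1).foldl (fun bd i =>
      (PySem.List.pyRange 0 m 1).foldl (fun bd j =>
        if pvCellEqStr (pvGet2 bd i j) request then
          if pvACheck n m i j cur then pvSet2 bd i j PCell.zero else bd
        else bd) bd) board
  else
    let request := String.ofList [(PySem.Str.pyGet? request 0).getD ' ']
    (PySem.List.pyRange 0 n 1).foldl (fun bd i =>
      (PySem.List.pyRange 0 m 1).foldl (fun bd j =>
        if pvCellEqStr (pvGet2 bd i j) request then
          if pvACheck n m i j cur then pvSet2 bd i j PCell.zero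
          else pvSet2 bd i j PCell.neg
        else bd) bd) board

def pvBStep (n m : Int) (index : PySem.Dict Char (List (Int × Int))) :
    PySem.Set (Int × Int) × PySem.Set (Int × Int) → String →
    PySem.Set (Int × Int) × PySem.Set (Int × Int) := fun zm request =>
  let zm := (PySem.List.sorted zm.2 (fun p => p.1 * m + p.2) false).foldl
    (fun (s : PySem.Set (Int × Int) × PySem.Set (Int × Int)) p =>
      if pvExposed n m p.1 p.2 s.1 then (PySem.Set.add s.1 p, PySem.Set.discard s.2 p)
      else s) zm
  let snapshot := zm.1
  if PySem.Str.len request = 1 then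
    ((PySem.Dict.getD index (request.toList.headD ' ') []).foldl (fun z p =>
      if ¬ PySem.Set.contains z p ∧ ¬ PySem.Set.contains zm.2 p ∧
          pvExposed n m p.1 p.2 snapshot
      then PySem.Set.add z p else z) zm.1, zm.2)
  else
    (PySem.Dict.getD index ((PySem.Str.pyGet? request 0).getD ' ') []).foldl (fun s p =>
      if ¬ PySem.Set.contains s.1 p ∧ ¬ PySem.Set.contains s.2 p then
        if pvExposed n m p.1 p.2 snapshot then (PySem.Set.add s.1 p, s.2)
        else (s.1, PySem.Set.add s.2 p)
      else s) zm

def pvIndex (S : List String) : PySem.Dict Char (List (Int × Int)) :=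
  (PySem.List.enumerate S 0).foldl (fun d pr =>
    (PySem.List.enumerate (PySem.List.slice pr.2.toList none (some ((pvM S : Nat) : Int))) 0).foldl
      (fun d q => PySem.Dict.modify d q.2 [] (fun l => l ++ [(pr.1, q.1)])) d)
    PySem.Dict.empty

lemma pv_foldl_grid {β : Type} (n m : Int) (f : β → Int → Int → β) (b0 : β) :
    (PySem.List.pyRange 0 n 1).foldl (fun b i =>
      (PySem.List.pyRange 0 m 1).foldl (fun b j => f b i j) b) b0
    = ((PySem.List.pyRange 0 n 1).flatMap
        (fun i => (PySem.List.pyRange 0 m 1).map (fun j => (i, j)))).foldl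
        (fun b p => f b p.1 p.2) b0 := by
  rw [List.foldl_flatMap]
  simp only [List.foldl_map]

lemma pv_mem_grid (S : List String) (p : Int × Int) : p ∈ pvGrid S ↔ pvInGrid S p := by
  simp only [pvGrid, pvInGrid, List.mem_flatMap, List.mem_map, PySem.List.mem_pyRange_one]
  constructor
  · rintro ⟨i, hi, j, hj, rfl⟩
    exact ⟨hi.1, hi.2, hj.1, hj.2⟩
  · rintro ⟨h1, h2, h3, h4⟩
    exact ⟨p.1, ⟨h1, h2⟩, p.2, ⟨h3, h4⟩, rfl⟩

lemma pv_grid_pairwise (S : List String) :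
    (pvGrid S).Pairwise (fun p q => p.1 * ((pvM S : Nat) : Int) + p.2 < q.1 * ((pvM S : Nat) : Int) + q.2) := by
  rw [pvGrid, List.pairwise_flatMap]
  constructor
  · intro a _
    rw [List.pairwise_map]
    refine (PySem.List.pairwise_lt_pyRange_one 0 ((pvM S : Nat) : Int)).imp ?_
    intro j j' h
    simpa using h
  · refine (PySem.List.pairwise_lt_pyRange_one 0 ((S.length : Nat) : Int)).imp ?_
    intro i i' hii x hx y hy
    simp only [List.mem_map, PySem.List.mem_pyRange_one] at hx hy
    obtain ⟨j, hj, rfl⟩ := hx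
    obtain ⟨j', hj', rfl⟩ := hy
    have hm : j < ((pvM S : Nat) : Int) := hj.2
    have h1 : (i + 1) * ((pvM S : Nat) : Int) ≤ i' * ((pvM S : Nat) : Int) :=
      mul_le_mul_of_nonneg_right (by omega) (by positivity)
    simp only []
    nlinarith [hj'.1]

lemma pv_grid_nodup (S : List String) : (pvGrid S).Nodup := by
  refine (pv_grid_pairwise S).imp ?_
  intro a b hlt he
  rw [he] at hlt
  exact lt_irrefl _ hlt

lemma pv_get2_boardOf (S : List String) (Z M : List (Int × Int)) (p : Int × Int)
    (hp : pvInGrid S p) : pvGet2 (pvBoardOf S Z M) p.1 p.2 = pvCellOf S Z M p := by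
  obtain ⟨h1, h2, h3, h4⟩ := hp
  unfold pvGet2 pvBoardOf
  rw [PySem.List.pyGetD_eq_getElem _ _ h1 (by simpa using h2)]
  rw [List.getElem_map, List.getElem_range]
  have hjlt : p.2.toNat < (pvRowOf S Z M p.1.toNat).length := by
    simp only [pvRowOf, List.length_append, List.length_map, List.length_range]
    omega
  rw [PySem.List.pyGetD_eq_getElem _ _ h3 (by omega)]
  unfold pvRowOf
  rw [List.getElem_append_left (by simp only [List.length_map, List.length_range]; omega)]
  rw [List.getElem_map, List.getElem_range]
  congr 1
  refine (Prod.ext ?_ ?_) <;> simp <;> omega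

lemma pv_set2_boardOf (S : List String) (Z M Z' M' : List (Int × Int)) (p : Int × Int) (v : PCell)
    (hp : pvInGrid S p)
    (hcong : ∀ q, pvInGrid S q → q ≠ p → pvCellOf S Z' M' q = pvCellOf S Z M q)
    (hv : pvCellOf S Z' M' p = v) :
    pvSet2 (pvBoardOf S Z M) p.1 p.2 v = pvBoardOf S Z' M' := by
  obtain ⟨h1, h2, h3, h4⟩ := hp
  unfold pvSet2 pvBoardOf
  rw [PySem.List.pyGetD_eq_getElem _ _ h1 (by simpa using h2)]
  rw [PySem.List.pySetD_of_nonneg _ _ h3, PySem.List.pySetD_of_nonneg _ _ h1]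
  rw [List.getElem_map, List.getElem_range]
  apply List.ext_getElem
  · simp
  intro k hk hk'
  rw [List.length_set, List.length_map, List.length_range] at hk
  conv_rhs => rw [List.getElem_map, List.getElem_range]
  rw [List.getElem_set]
  split_ifs with hke
  · subst hke
    unfold pvRowOf
    rw [List.set_append, if_pos (by simp only [List.length_map, List.length_range]; omega)]
    congr 1
    apply List.ext_getElem
    · simp
    intro j hj hj'
    rw [List.length_set, List.length_map, List.length_range] at hj
    conv_rhs => rw [List.getElem_map, List.getElem_range]
    rw [List.getElem_set]
    split_ifs with hje
    · rw [← hv]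
      congr 1
      refine Prod.ext ?_ ?_ <;> simp <;> omega
    · rw [List.getElem_map, List.getElem_range]
      refine (hcong ((p.1.toNat : Int), (j : Int)) ⟨by omega, by omega, by omega, by omega⟩ ?_).symm
      intro he
      apply hje
      have := congrArg Prod.snd he
      simp at this
      omega
  · rw [List.getElem_map, List.getElem_range]
    unfold pvRowOf
    congr 1
    apply List.map_congr_left
    intro j hj
    rw [List.mem_range] at hj
    refine (hcong ((k : Int), (j : Int)) ⟨by omega, by omega, by omega, by omega⟩ ?_).symm
    intro he
    apply hke
    have := congrArg Prod.fst he
    simp at this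
    omega

lemma pv_cell_zero_iff (S : List String) (Z M : List (Int × Int)) (p : Int × Int) :
    pvCellOf S Z M p = PCell.zero ↔ p ∈ Z := by
  unfold pvCellOf
  split_ifs with h1 h2 <;> simp_all

lemma pv_cell_neg_iff (S : List String) (Z M : List (Int × Int)) (p : Int × Int)
    (hd : p ∈ M → p ∉ Z) : pvCellOf S Z M p = PCell.neg ↔ p ∈ M := by
  unfold pvCellOf
  split_ifs with h1 h2
  · exact iff_of_false (by simp) (fun hM => hd hM h1)
  · simp [h2]
  · simp [h2]

lemma pv_cell_ch_iff (S : List String) (Z M : List (Int × Int)) (p : Int × Int) (c : Char) :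
    pvCellOf S Z M p = PCell.ch c ↔ p ∉ Z ∧ p ∉ M ∧ pvCharAt S p = c := by
  unfold pvCellOf
  split_ifs with h1 h2 <;> simp_all

lemma pv_check_eq (S : List String) (Z M : List (Int × Int)) (_hI : pvSInv S Z M)
    (p : Int × Int) (hp : pvInGrid S p) :
    pvACheck (S.length : Int) ((pvM S : Nat) : Int) p.1 p.2 (pvBoardOf S Z M)
      = pvExposed (S.length : Int) ((pvM S : Nat) : Int) p.1 p.2 Z := by
  unfold pvACheck pvExposed
  by_cases hb : p.1 = 0 ∨ p.2 = 0 ∨ p.1 = (S.length : Int) - 1 ∨ p.2 = ((pvM S : Nat) : Int) - 1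
  · rw [if_pos hb, if_pos hb]
  · rw [if_neg hb, if_neg hb]
    have hb1 : p.1 ≠ 0 := fun h => hb (Or.inl h)
    have hb2 : p.2 ≠ 0 := fun h => hb (Or.inr (Or.inl h))
    have hb3 : p.1 ≠ (S.length : Int) - 1 := fun h => hb (Or.inr (Or.inr (Or.inl h)))
    have hb4 : p.2 ≠ ((pvM S : Nat) : Int) - 1 := fun h => hb (Or.inr (Or.inr (Or.inr h)))
    obtain ⟨h1, h2, h3, h4⟩ := hp
    have hr : PySem.List.pyRange 0 4 1 = [0, 1, 2, 3] := by decide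
    rw [hr]
    simp only [List.any_cons, List.any_nil, Bool.or_false]
    have e0 : PySem.List.pyGetD ([1, -1, 0, 0] : List Int) 0 0 = 1 := by decide
    have e1 : PySem.List.pyGetD ([1, -1, 0, 0] : List Int) 1 0 = -1 := by decide
    have e2 : PySem.List.pyGetD ([1, -1, 0, 0] : List Int) 2 0 = 0 := by decide
    have e3 : PySem.List.pyGetD ([1, -1, 0, 0] : List Int) 3 0 = 0 := by decide
    have f0 : PySem.List.pyGetD ([0, 0, 1, -1] : List Int) 0 0 = 0 := by decide
    have f1 : PySem.List.pyGetD ([0, 0, 1, -1] : List Int) 1 0 = 0 := by decide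
    have f2 : PySem.List.pyGetD ([0, 0, 1, -1] : List Int) 2 0 = 1 := by decide
    have f3 : PySem.List.pyGetD ([0, 0, 1, -1] : List Int) 3 0 = -1 := by decide
    simp only [e0, e1, e2, e3, f0, f1, f2, f3, add_zero, ← sub_eq_add_neg]
    have g1 : pvGet2 (pvBoardOf S Z M) (p.1 + 1) p.2 = pvCellOf S Z M (p.1 + 1, p.2) :=
      pv_get2_boardOf S Z M (p.1 + 1, p.2) ⟨by omega, by omega, by omega, by omega⟩
    have g2 : pvGet2 (pvBoardOf S Z M) (p.1 - 1) p.2 = pvCellOf S Z M (p.1 - 1, p.2) :=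
      pv_get2_boardOf S Z M (p.1 - 1, p.2) ⟨by omega, by omega, by omega, by omega⟩
    have g3 : pvGet2 (pvBoardOf S Z M) p.1 (p.2 + 1) = pvCellOf S Z M (p.1, p.2 + 1) :=
      pv_get2_boardOf S Z M (p.1, p.2 + 1) ⟨by omega, by omega, by omega, by omega⟩
    have g4 : pvGet2 (pvBoardOf S Z M) p.1 (p.2 - 1) = pvCellOf S Z M (p.1, p.2 - 1) :=
      pv_get2_boardOf S Z M (p.1, p.2 - 1) ⟨by omega, by omega, by omega, by omega⟩
    rw [Bool.eq_iff_iff]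
    simp only [Bool.or_eq_true, Bool.and_eq_true, decide_eq_true_eq, beq_iff_eq,
      PySem.Set.contains_iff, g1, g2, g3, g4, pv_cell_zero_iff]
    have hA : 0 ≤ p.1 + 1 ∧ p.1 + 1 < (S.length : Int) ∧ 0 ≤ p.2 ∧ p.2 < ((pvM S : Nat) : Int) :=
      ⟨by omega, by omega, by omega, by omega⟩
    have hB : 0 ≤ p.1 - 1 ∧ p.1 - 1 < (S.length : Int) ∧ 0 ≤ p.2 ∧ p.2 < ((pvM S : Nat) : Int) :=
      ⟨by omega, by omega, by omega, by omega⟩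
    have hC : 0 ≤ p.1 ∧ p.1 < (S.length : Int) ∧ 0 ≤ p.2 + 1 ∧ p.2 + 1 < ((pvM S : Nat) : Int) :=
      ⟨by omega, by omega, by omega, by omega⟩
    have hD : 0 ≤ p.1 ∧ p.1 < (S.length : Int) ∧ 0 ≤ p.2 - 1 ∧ p.2 - 1 < ((pvM S : Nat) : Int) :=
      ⟨by omega, by omega, by omega, by omega⟩
    constructor
    · rintro (⟨_, h⟩ | ⟨_, h⟩ | ⟨_, h⟩ | ⟨_, h⟩)
      exacts [Or.inl (Or.inl (Or.inl h)), Or.inl (Or.inl (Or.inr h)), Or.inl (Or.inr h), Or.inr h]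
    · rintro (((h | h) | h) | h)
      exacts [Or.inl ⟨hA, h⟩, Or.inr (Or.inl ⟨hB, h⟩), Or.inr (Or.inr (Or.inl ⟨hC, h⟩)),
        Or.inr (Or.inr (Or.inr ⟨hD, h⟩))]

lemma pv_pass1 (S : List String) :
    ∀ (L : List (Int × Int)) (Z M : PySem.Set (Int × Int)), pvSInv S Z M → L.Nodup →
    (∀ p ∈ L, pvInGrid S p) →
    (L.foldl (fun bd (p : Int × Int) =>
        if pvGet2 bd p.1 p.2 == PCell.neg then
          if pvACheck (S.length : Int) ((pvM S : Nat) : Int) p.1 p.2 bd then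
            pvSet2 bd p.1 p.2 PCell.zero
          else bd
        else bd) (pvBoardOf S Z M)
      = pvBoardOf S
        ((L.filter (fun p => decide (p ∈ M))).foldl
          (fun (s : PySem.Set (Int × Int) × PySem.Set (Int × Int)) p =>
            if pvExposed (S.length : Int) ((pvM S : Nat) : Int) p.1 p.2 s.1 then
              (PySem.Set.add s.1 p, PySem.Set.discard s.2 p)
            else s) (Z, M)).1
        ((L.filter (fun p => decide (p ∈ M))).foldl
          (fun (s : PySem.Set (Int × Int) × PySem.Set (Int × Int)) p =>
            if pvExposed (S.length : Int) ((pvM S : Nat) : Int) p.1 p.2 s.1 then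
              (PySem.Set.add s.1 p, PySem.Set.discard s.2 p)
            else s) (Z, M)).2)
    ∧ pvSInv S
        ((L.filter (fun p => decide (p ∈ M))).foldl
          (fun (s : PySem.Set (Int × Int) × PySem.Set (Int × Int)) p =>
            if pvExposed (S.length : Int) ((pvM S : Nat) : Int) p.1 p.2 s.1 then
              (PySem.Set.add s.1 p, PySem.Set.discard s.2 p)
            else s) (Z, M)).1
        ((L.filter (fun p => decide (p ∈ M))).foldl
          (fun (s : PySem.Set (Int × Int) × PySem.Set (Int × Int)) p =>
            if pvExposed (S.length : Int) ((pvM S : Nat) : Int) p.1 p.2 s.1 then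
              (PySem.Set.add s.1 p, PySem.Set.discard s.2 p)
            else s) (Z, M)).2 := by
  intro L
  induction L with
  | nil => intro Z M hI _ _; exact ⟨rfl, hI⟩
  | cons p L ih =>
    intro Z M hI hnd hg
    have hIp : pvInGrid S p := hg p (List.mem_cons_self ..)
    obtain ⟨hndp, hndL⟩ := List.nodup_cons.mp hnd
    have hgL : ∀ q ∈ L, pvInGrid S q := fun q hq => hg q (List.mem_cons_of_mem _ hq)
    simp only [List.foldl_cons, List.filter_cons]
    by_cases hpM : p ∈ M
    · have hpZ : p ∉ Z := fun hZ => (hI.2.2.1 p hZ).2 hpM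
      have hneg : pvCellOf S Z M p = PCell.neg :=
        (pv_cell_neg_iff S Z M p (fun _ => hpZ)).mpr hpM
      have hcnd : (pvGet2 (pvBoardOf S Z M) p.1 p.2 == PCell.neg) = true := by
        rw [pv_get2_boardOf S Z M p hIp, hneg]; rfl
      have hdm : decide (p ∈ M) = true := decide_eq_true hpM
      simp only [hcnd, hdm, if_true, List.foldl_cons]
      rw [pv_check_eq S Z M hI p hIp]
      by_cases hex : pvExposed (S.length : Int) ((pvM S : Nat) : Int) p.1 p.2 Z = true
      · have hI' : pvSInv S (PySem.Set.add Z p) (PySem.Set.discard M p) := by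
          refine ⟨PySem.Set.nodup_add _ _ hI.1, PySem.Set.nodup_discard _ _ hI.2.1, ?_, ?_⟩
          · intro q hq
            rcases (PySem.Set.mem_add _ _ _).mp hq with hq | rfl
            · exact ⟨(hI.2.2.1 q hq).1, fun hq' => (hI.2.2.1 q hq).2 ((PySem.Set.mem_discard _ _ _).mp hq').1⟩
            · exact ⟨hIp, fun hq' => ((PySem.Set.mem_discard _ _ _).mp hq').2 rfl⟩
          · intro q hq
            exact hI.2.2.2 q ((PySem.Set.mem_discard _ _ _).mp hq).1
        have hset : pvSet2 (pvBoardOf S Z M) p.1 p.2 PCell.zero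
            = pvBoardOf S (PySem.Set.add Z p) (PySem.Set.discard M p) := by
          refine pv_set2_boardOf S Z M _ _ p PCell.zero hIp ?_ ?_
          · intro q _ hne
            simp [pvCellOf, PySem.Set.mem_add, PySem.Set.mem_discard, hne]
          · simp [pvCellOf, PySem.Set.mem_add]
        have hfl : L.filter (fun q => decide (q ∈ M))
            = L.filter (fun q => decide (q ∈ PySem.Set.discard M p)) := by
          apply List.filter_congr
          intro q hq
          have hne : q ≠ p := fun he => hndp (he ▸ hq)
          simp [PySem.Set.mem_discard, hne]
        simp only [hex, if_true, hset, hfl]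
        exact ih (PySem.Set.add Z p) (PySem.Set.discard M p) hI' hndL hgL
      · rw [Bool.not_eq_true] at hex
        simp only [hex, Bool.false_eq_true, if_false]
        exact ih Z M hI hndL hgL
    · have hnneg : pvCellOf S Z M p ≠ PCell.neg := fun he =>
        hpM ((pv_cell_neg_iff S Z M p (fun hM _ => absurd hM hpM)).mp he)
      have hcnd : (pvGet2 (pvBoardOf S Z M) p.1 p.2 == PCell.neg) = false := by
        rw [pv_get2_boardOf S Z M p hIp]
        exact beq_eq_false_iff_ne.mpr hnneg
      have hdm : decide (p ∈ M) = false := decide_eq_false hpM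
      simp only [hcnd, hdm, Bool.false_eq_true, if_false]
      exact ih Z M hI hndL hgL

lemma pv_sorted_minus (S : List String) (M : List (Int × Int)) (h : M.Nodup)
    (hg : ∀ p ∈ M, pvInGrid S p) :
    PySem.List.sorted M (fun p => p.1 * ((pvM S : Nat) : Int) + p.2) false
      = (pvGrid S).filter (fun p => decide (p ∈ M)) := by
  refine PySem.List.sorted_eq_of_perm_of_pairwise_lt M _ _ ?_ ?_
  · refine (List.perm_ext_iff_of_nodup ((pv_grid_nodup S).filter _) h).mpr ?_
    intro q
    simp only [List.mem_filter, decide_eq_true_eq, pv_mem_grid]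
    constructor
    · rintro ⟨_, hq⟩; exact hq
    · intro hq; exact ⟨hg q hq, hq⟩
  · exact (pv_grid_pairwise S).filter _

lemma pv_cellEqStr_iff (S : List String) (Z M : List (Int × Int)) (p : Int × Int)
    (request : String) (c : Char) (hreq : request.toList = [c]) :
    pvCellEqStr (pvCellOf S Z M p) request = true ↔ (p ∉ Z ∧ p ∉ M ∧ pvCharAt S p = c) := by
  have h1 : pvCellEqStr (pvCellOf S Z M p) request = true ↔ pvCellOf S Z M p = PCell.ch c := by
    cases hcell : pvCellOf S Z M p with
    | ch c' =>
      simp only [pvCellEqStr, hreq, beq_iff_eq, List.cons.injEq, and_true, PCell.ch.injEq]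
      exact eq_comm
    | zero => simp [pvCellEqStr]
    | neg => simp [pvCellEqStr]
  rw [h1, pv_cell_ch_iff]

lemma pv_pass2 (S : List String) (c : Char) (request : String) (hreq : request.toList = [c])
    (Z0 M0 : PySem.Set (Int × Int)) (h0 : pvSInv S Z0 M0) :
    ∀ (L : List (Int × Int)) (Z : PySem.Set (Int × Int)), L.Nodup → (∀ p ∈ L, pvInGrid S p) →
    pvSInv S Z M0 →
    (L.foldl (fun bd (p : Int × Int) =>
        if pvCellEqStr (pvGet2 bd p.1 p.2) request then
          if pvACheck (S.length : Int) ((pvM S : Nat) : Int) p.1 p.2 (pvBoardOf S Z0 M0) then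
            pvSet2 bd p.1 p.2 PCell.zero
          else bd
        else bd) (pvBoardOf S Z M0)
      = pvBoardOf S
          ((L.filter (fun p => decide (pvCharAt S p = c))).foldl
            (fun z p =>
              if ¬ PySem.Set.contains z p ∧ ¬ PySem.Set.contains M0 p ∧
                  pvExposed (S.length : Int) ((pvM S : Nat) : Int) p.1 p.2 Z0 then
                PySem.Set.add z p
              else z) Z) M0)
    ∧ pvSInv S
        ((L.filter (fun p => decide (pvCharAt S p = c))).foldl
          (fun z p =>
            if ¬ PySem.Set.contains z p ∧ ¬ PySem.Set.contains M0 p ∧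
                pvExposed (S.length : Int) ((pvM S : Nat) : Int) p.1 p.2 Z0 then
              PySem.Set.add z p
            else z) Z) M0 := by
  intro L
  induction L with
  | nil => intro Z _ _ hI; exact ⟨rfl, hI⟩
  | cons p L ih =>
    intro Z hnd hg hI
    have hIp : pvInGrid S p := hg p (List.mem_cons_self ..)
    obtain ⟨hndp, hndL⟩ := List.nodup_cons.mp hnd
    have hgL : ∀ q ∈ L, pvInGrid S q := fun q hq => hg q (List.mem_cons_of_mem _ hq)
    simp only [List.foldl_cons, List.filter_cons]
    by_cases hch : pvCharAt S p = c
    · have hdc : decide (pvCharAt S p = c) = true := decide_eq_true hch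
      simp only [hdc, if_true, List.foldl_cons]
      by_cases hmemZ : p ∈ Z
      · have hcnd : pvCellEqStr (pvGet2 (pvBoardOf S Z M0) p.1 p.2) request = false := by
          rw [pv_get2_boardOf S Z M0 p hIp]
          rw [Bool.eq_false_iff]
          intro h
          exact ((pv_cellEqStr_iff S Z M0 p request c hreq).mp h).1 hmemZ
        have hg2 : ¬ (¬ PySem.Set.contains Z p = true ∧ ¬ PySem.Set.contains M0 p = true ∧
            pvExposed (S.length : Int) ((pvM S : Nat) : Int) p.1 p.2 Z0 = true) := by
          rintro ⟨h, -, -⟩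
          exact h ((PySem.Set.contains_iff _ _).mpr hmemZ)
        simp only [hcnd, Bool.false_eq_true, if_false]
        rw [if_neg hg2]
        exact ih Z hndL hgL hI
      · by_cases hmemM : p ∈ M0
        · have hcnd : pvCellEqStr (pvGet2 (pvBoardOf S Z M0) p.1 p.2) request = false := by
            rw [pv_get2_boardOf S Z M0 p hIp]
            rw [Bool.eq_false_iff]
            intro h
            exact ((pv_cellEqStr_iff S Z M0 p request c hreq).mp h).2.1 hmemM
          have hg2 : ¬ (¬ PySem.Set.contains Z p = true ∧ ¬ PySem.Set.contains M0 p = true ∧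
              pvExposed (S.length : Int) ((pvM S : Nat) : Int) p.1 p.2 Z0 = true) := by
            rintro ⟨-, h, -⟩
            exact h ((PySem.Set.contains_iff _ _).mpr hmemM)
          simp only [hcnd, Bool.false_eq_true, if_false]
          rw [if_neg hg2]
          exact ih Z hndL hgL hI
        · have hcnd : pvCellEqStr (pvGet2 (pvBoardOf S Z M0) p.1 p.2) request = true := by
            rw [pv_get2_boardOf S Z M0 p hIp]
            exact (pv_cellEqStr_iff S Z M0 p request c hreq).mpr ⟨hmemZ, hmemM, hch⟩
          simp only [hcnd, if_true]
          rw [pv_check_eq S Z0 M0 h0 p hIp]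
          by_cases hex : pvExposed (S.length : Int) ((pvM S : Nat) : Int) p.1 p.2 Z0 = true
          · have hI' : pvSInv S (PySem.Set.add Z p) M0 := by
              refine ⟨PySem.Set.nodup_add _ _ hI.1, hI.2.1, ?_, hI.2.2.2⟩
              intro q hq
              rcases (PySem.Set.mem_add _ _ _).mp hq with hq | rfl
              · exact hI.2.2.1 q hq
              · exact ⟨hIp, hmemM⟩
            have hset : pvSet2 (pvBoardOf S Z M0) p.1 p.2 PCell.zero
                = pvBoardOf S (PySem.Set.add Z p) M0 := by
              refine pv_set2_boardOf S Z M0 _ _ p PCell.zero hIp ?_ ?_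
              · intro q _ hne
                simp [pvCellOf, PySem.Set.mem_add, hne]
              · simp [pvCellOf, PySem.Set.mem_add]
            rw [if_pos hex]
            rw [hset]
            rw [if_pos ⟨fun h => hmemZ ((PySem.Set.contains_iff _ _).mp h),
              fun h => hmemM ((PySem.Set.contains_iff _ _).mp h), hex⟩]
            exact ih (PySem.Set.add Z p) hndL hgL hI'
          · rw [if_neg hex]
            rw [if_neg (fun h => hex h.2.2)]
            exact ih Z hndL hgL hI
    · have hdc : decide (pvCharAt S p = c) = false := decide_eq_false hch
      have hcnd : pvCellEqStr (pvGet2 (pvBoardOf S Z M0) p.1 p.2) request = false := by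
        rw [pv_get2_boardOf S Z M0 p hIp]
        rw [Bool.eq_false_iff]
        intro h
        exact hch (((pv_cellEqStr_iff S Z M0 p request c hreq).mp h).2.2)
      simp only [hdc, hcnd, Bool.false_eq_true, if_false]
      exact ih Z hndL hgL hI

lemma pv_pass3 (S : List String) (c : Char) (request : String) (hreq : request.toList = [c])
    (Z0 M0 : PySem.Set (Int × Int)) (h0 : pvSInv S Z0 M0) :
    ∀ (L : List (Int × Int)) (Z M : PySem.Set (Int × Int)), L.Nodup → (∀ p ∈ L, pvInGrid S p) →
    pvSInv S Z M →
    (L.foldl (fun bd (p : Int × Int) =>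
        if pvCellEqStr (pvGet2 bd p.1 p.2) request then
          if pvACheck (S.length : Int) ((pvM S : Nat) : Int) p.1 p.2 (pvBoardOf S Z0 M0) then
            pvSet2 bd p.1 p.2 PCell.zero
          else pvSet2 bd p.1 p.2 PCell.neg
        else bd) (pvBoardOf S Z M)
      = pvBoardOf S
          ((L.filter (fun p => decide (pvCharAt S p = c))).foldl
            (fun (s : PySem.Set (Int × Int) × PySem.Set (Int × Int)) p =>
              if ¬ PySem.Set.contains s.1 p ∧ ¬ PySem.Set.contains s.2 p then
                if pvExposed (S.length : Int) ((pvM S : Nat) : Int) p.1 p.2 Z0 then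
                  (PySem.Set.add s.1 p, s.2)
                else (s.1, PySem.Set.add s.2 p)
              else s) (Z, M)).1
          ((L.filter (fun p => decide (pvCharAt S p = c))).foldl
            (fun (s : PySem.Set (Int × Int) × PySem.Set (Int × Int)) p =>
              if ¬ PySem.Set.contains s.1 p ∧ ¬ PySem.Set.contains s.2 p then
                if pvExposed (S.length : Int) ((pvM S : Nat) : Int) p.1 p.2 Z0 then
                  (PySem.Set.add s.1 p, s.2)
                else (s.1, PySem.Set.add s.2 p)
              else s) (Z, M)).2)
    ∧ pvSInv S
        ((L.filter (fun p => decide (pvCharAt S p = c))).foldl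
          (fun (s : PySem.Set (Int × Int) × PySem.Set (Int × Int)) p =>
            if ¬ PySem.Set.contains s.1 p ∧ ¬ PySem.Set.contains s.2 p then
              if pvExposed (S.length : Int) ((pvM S : Nat) : Int) p.1 p.2 Z0 then
                (PySem.Set.add s.1 p, s.2)
              else (s.1, PySem.Set.add s.2 p)
            else s) (Z, M)).1
        ((L.filter (fun p => decide (pvCharAt S p = c))).foldl
          (fun (s : PySem.Set (Int × Int) × PySem.Set (Int × Int)) p =>
            if ¬ PySem.Set.contains s.1 p ∧ ¬ PySem.Set.contains s.2 p then
              if pvExposed (S.length : Int) ((pvM S : Nat) : Int) p.1 p.2 Z0 then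
                (PySem.Set.add s.1 p, s.2)
              else (s.1, PySem.Set.add s.2 p)
            else s) (Z, M)).2 := by
  intro L
  induction L with
  | nil => intro Z M _ _ hI; exact ⟨rfl, hI⟩
  | cons p L ih =>
    intro Z M hnd hg hI
    have hIp : pvInGrid S p := hg p (List.mem_cons_self ..)
    obtain ⟨hndp, hndL⟩ := List.nodup_cons.mp hnd
    have hgL : ∀ q ∈ L, pvInGrid S q := fun q hq => hg q (List.mem_cons_of_mem _ hq)
    simp only [List.foldl_cons, List.filter_cons]
    by_cases hch : pvCharAt S p = c
    · have hdc : decide (pvCharAt S p = c) = true := decide_eq_true hch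
      simp only [hdc, if_true, List.foldl_cons]
      by_cases hmemZ : p ∈ Z
      · have hcnd : pvCellEqStr (pvGet2 (pvBoardOf S Z M) p.1 p.2) request = false := by
          rw [pv_get2_boardOf S Z M p hIp]
          rw [Bool.eq_false_iff]
          intro h
          exact ((pv_cellEqStr_iff S Z M p request c hreq).mp h).1 hmemZ
        have hg2 : ¬ (¬ PySem.Set.contains Z p = true ∧ ¬ PySem.Set.contains M p = true) := by
          rintro ⟨h, -⟩
          exact h ((PySem.Set.contains_iff _ _).mpr hmemZ)
        simp only [hcnd, Bool.false_eq_true, if_false]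
        rw [if_neg hg2]
        exact ih Z M hndL hgL hI
      · by_cases hmemM : p ∈ M
        · have hcnd : pvCellEqStr (pvGet2 (pvBoardOf S Z M) p.1 p.2) request = false := by
            rw [pv_get2_boardOf S Z M p hIp]
            rw [Bool.eq_false_iff]
            intro h
            exact ((pv_cellEqStr_iff S Z M p request c hreq).mp h).2.1 hmemM
          have hg2 : ¬ (¬ PySem.Set.contains Z p = true ∧ ¬ PySem.Set.contains M p = true) := by
            rintro ⟨-, h⟩
            exact h ((PySem.Set.contains_iff _ _).mpr hmemM)
          simp only [hcnd, Bool.false_eq_true, if_false]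
          rw [if_neg hg2]
          exact ih Z M hndL hgL hI
        · have hcnd : pvCellEqStr (pvGet2 (pvBoardOf S Z M) p.1 p.2) request = true := by
            rw [pv_get2_boardOf S Z M p hIp]
            exact (pv_cellEqStr_iff S Z M p request c hreq).mpr ⟨hmemZ, hmemM, hch⟩
          simp only [hcnd, if_true]
          rw [pv_check_eq S Z0 M0 h0 p hIp]
          have hgB : ¬ PySem.Set.contains Z p = true ∧ ¬ PySem.Set.contains M p = true :=
            ⟨fun h => hmemZ ((PySem.Set.contains_iff _ _).mp h),
             fun h => hmemM ((PySem.Set.contains_iff _ _).mp h)⟩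
          rw [if_pos hgB]
          by_cases hex : pvExposed (S.length : Int) ((pvM S : Nat) : Int) p.1 p.2 Z0 = true
          · have hI' : pvSInv S (PySem.Set.add Z p) M := by
              refine ⟨PySem.Set.nodup_add _ _ hI.1, hI.2.1, ?_, hI.2.2.2⟩
              intro q hq
              rcases (PySem.Set.mem_add _ _ _).mp hq with hq | rfl
              · exact hI.2.2.1 q hq
              · exact ⟨hIp, hmemM⟩
            have hset : pvSet2 (pvBoardOf S Z M) p.1 p.2 PCell.zero
                = pvBoardOf S (PySem.Set.add Z p) M := by
              refine pv_set2_boardOf S Z M _ _ p PCell.zero hIp ?_ ?_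
              · intro q _ hne
                simp [pvCellOf, PySem.Set.mem_add, hne]
              · simp [pvCellOf, PySem.Set.mem_add]
            rw [if_pos hex]
            rw [if_pos hex]
            rw [hset]
            exact ih (PySem.Set.add Z p) M hndL hgL hI'
          · have hI' : pvSInv S Z (PySem.Set.add M p) := by
              refine ⟨hI.1, PySem.Set.nodup_add _ _ hI.2.1, ?_, ?_⟩
              · intro q hq
                refine ⟨(hI.2.2.1 q hq).1, ?_⟩
                intro hq'
                rcases (PySem.Set.mem_add _ _ _).mp hq' with hq' | rfl
                · exact (hI.2.2.1 q hq).2 hq'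
                · exact hmemZ hq
              · intro q hq
                rcases (PySem.Set.mem_add _ _ _).mp hq with hq | rfl
                · exact hI.2.2.2 q hq
                · exact hIp
            have hset : pvSet2 (pvBoardOf S Z M) p.1 p.2 PCell.neg
                = pvBoardOf S Z (PySem.Set.add M p) := by
              refine pv_set2_boardOf S Z M _ _ p PCell.neg hIp ?_ ?_
              · intro q _ hne
                simp [pvCellOf, PySem.Set.mem_add, hne]
              · simp [pvCellOf, PySem.Set.mem_add, hmemZ]
            rw [if_neg hex]
            rw [if_neg hex]
            rw [hset]
            exact ih Z (PySem.Set.add M p) hndL hgL hI'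
    · have hdc : decide (pvCharAt S p = c) = false := decide_eq_false hch
      have hcnd : pvCellEqStr (pvGet2 (pvBoardOf S Z M) p.1 p.2) request = false := by
        rw [pv_get2_boardOf S Z M p hIp]
        rw [Bool.eq_false_iff]
        intro h
        exact hch (((pv_cellEqStr_iff S Z M p request c hreq).mp h).2.2)
      simp only [hdc, hcnd, Bool.false_eq_true, if_false]
      exact ih Z M hndL hgL hI

lemma pv_index_row (S : List String) (hlen : ∀ s ∈ S, pvM S ≤ s.toList.length) (c : Char)
    (i : Int) (hi : 0 ≤ i) (hi2 : i < (S.length : Int)) :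
    List.map (fun x => x.2) (List.filter (fun x => x.1 == c)
      (List.map (fun q => (q.2, (i, q.1)))
        (PySem.List.enumerate (PySem.List.slice (PySem.List.pyGetD S i "").toList none
          (some ((pvM S : Nat) : Int))) 0)))
    = List.filter (fun p => decide (pvCharAt S p = c))
        (List.map (fun j => (i, j)) (PySem.List.pyRange 0 ((pvM S : Nat) : Int) 1)) := by
  have hrow : PySem.List.pyGetD S i "" = S[i.toNat] :=
    PySem.List.pyGetD_eq_getElem _ _ hi (by simpa using hi2)
  have hle : pvM S ≤ S[i.toNat].toList.length := hlen _ (List.getElem_mem _)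
  have hsl : PySem.List.slice S[i.toNat].toList none (some ((pvM S : Nat) : Int))
      = S[i.toNat].toList.take (pvM S) := PySem.List.slice_to_natCast _ _
  have hlt : (S[i.toNat].toList.take (pvM S)).length = pvM S := by
    simp only [List.length_take]
    omega
  rw [hrow, hsl]
  rw [PySem.List.enumerate_eq_map_pyRange _ ' ']
  rw [PySem.List.len_eq, hlt]
  rw [List.map_map, List.filter_map, List.map_map]
  conv_rhs => rw [List.filter_map]
  have hsg : S.getD i.toNat "" = S[i.toNat] := List.getD_eq_getElem S "" (by omega)
  have hchar : ∀ j ∈ PySem.List.pyRange 0 ((pvM S : Nat) : Int) 1,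
      PySem.List.pyGetD (S[i.toNat].toList.take (pvM S)) j ' ' = pvCharAt S (i, j) := by
    intro j hj
    rw [PySem.List.mem_pyRange_one] at hj
    rw [PySem.List.pyGetD_of_nonneg _ _ hj.1]
    unfold pvCharAt
    have hj2 : j.toNat < pvM S := by omega
    rw [List.getD_eq_getElem _ _ (by omega), List.getD_eq_getElem _ _ (by rw [hsg]; omega)]
    simp only [List.getElem_take]
    congr 1
    rw [hsg]
  have hfil : List.filter
        ((fun x => x.1 == c) ∘ (fun q => (q.2, (i, q.1))) ∘
          (fun j => (j, PySem.List.pyGetD (S[i.toNat].toList.take (pvM S)) j ' ')))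
        (PySem.List.pyRange 0 ((pvM S : Nat) : Int) 1)
      = List.filter ((fun p => decide (pvCharAt S p = c)) ∘ (fun j => (i, j)))
        (PySem.List.pyRange 0 ((pvM S : Nat) : Int) 1) := by
    apply List.filter_congr
    intro j hj
    simp only [Function.comp_apply]
    rw [hchar j hj]
    rw [Bool.eq_iff_iff]
    simp only [beq_iff_eq, decide_eq_true_eq]
  rw [hfil]
  exact List.map_congr_left (fun j _ => rfl)

lemma pv_index_getD (S : List String) (hlen : ∀ s ∈ S, pvM S ≤ s.toList.length) (c : Char) :
    PySem.Dict.getD (pvIndex S) c [] = (pvGrid S).filter (fun p => decide (pvCharAt S p = c)) := by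
  unfold pvIndex
  have h1 : ((PySem.List.enumerate S 0).flatMap (fun pr =>
        (PySem.List.enumerate (PySem.List.slice pr.2.toList none (some ((pvM S : Nat) : Int))) 0).map
          (fun q => (q.2, (pr.1, q.1))))).foldl
        (fun d x => PySem.Dict.modify d x.1 [] (fun l => l ++ [x.2])) PySem.Dict.empty
      = (PySem.List.enumerate S 0).foldl (fun d pr =>
          (PySem.List.enumerate (PySem.List.slice pr.2.toList none (some ((pvM S : Nat) : Int))) 0).foldl
            (fun d q => PySem.Dict.modify d q.2 [] (fun l => l ++ [(pr.1, q.1)])) d)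
          PySem.Dict.empty := by
    rw [List.foldl_flatMap]
    apply PySem.List.foldl_congr_mem
    intro acc pr _
    rw [List.foldl_map]
  rw [← h1]
  rw [PySem.Dict.getD_foldl_modify_append]
  simp only [PySem.Dict.getD_empty, List.nil_append]
  rw [List.filter_flatMap, List.map_flatMap]
  conv_rhs => rw [pvGrid, List.filter_flatMap]
  rw [PySem.List.enumerate_eq_map_pyRange S "", PySem.List.len_eq]
  rw [List.flatMap_map]
  rw [List.flatMap_def, List.flatMap_def]
  congr 1
  apply List.map_congr_left
  intro i hi
  rw [PySem.List.mem_pyRange_one] at hi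
  exact pv_index_row S hlen c i hi.1 hi.2

lemma pv_step (S : List String) (hlen : ∀ s ∈ S, pvM S ≤ s.toList.length)
    (r : String) (_hr : r ≠ "") (Z M : PySem.Set (Int × Int)) (hI : pvSInv S Z M) :
    pvAStep (S.length : Int) ((pvM S : Nat) : Int) (pvBoardOf S Z M) r
      = pvBoardOf S (pvBStep (S.length : Int) ((pvM S : Nat) : Int) (pvIndex S) (Z, M) r).1
          (pvBStep (S.length : Int) ((pvM S : Nat) : Int) (pvIndex S) (Z, M) r).2
    ∧ pvSInv S (pvBStep (S.length : Int) ((pvM S : Nat) : Int) (pvIndex S) (Z, M) r).1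
        (pvBStep (S.length : Int) ((pvM S : Nat) : Int) (pvIndex S) (Z, M) r).2 := by
  unfold pvAStep pvBStep
  simp only []
  have hs := pv_sorted_minus S M hI.2.1 hI.2.2.2
  rw [hs]
  rw [pv_foldl_grid (S.length : Int) ((pvM S : Nat) : Int)
    (fun bd i j => if pvGet2 bd i j == PCell.neg then
      if pvACheck (S.length : Int) ((pvM S : Nat) : Int) i j bd then pvSet2 bd i j PCell.zero
      else bd
    else bd) (pvBoardOf S Z M)]
  have hgr : ((PySem.List.pyRange 0 (S.length : Int) 1).flatMap
      (fun i => (PySem.List.pyRange 0 ((pvM S : Nat) : Int) 1).map (fun j => (i, j)))) = pvGrid S := rfl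
  rw [hgr]
  obtain ⟨e1, hI1⟩ := pv_pass1 S (pvGrid S) Z M hI (pv_grid_nodup S)
    (fun p hp => (pv_mem_grid S p).mp hp)
  rw [e1]
  set X := ((pvGrid S).filter (fun p => decide (p ∈ M))).foldl
    (fun (s : PySem.Set (Int × Int) × PySem.Set (Int × Int)) p =>
      if pvExposed (S.length : Int) ((pvM S : Nat) : Int) p.1 p.2 s.1 then
        (PySem.Set.add s.1 p, PySem.Set.discard s.2 p)
      else s) (Z, M) with hX
  by_cases hl1 : PySem.Str.len r = 1
  · rw [if_pos hl1]
    rw [if_pos hl1]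
    have hc : r.toList = [r.toList.headD ' '] := by
      have h2 : r.toList.length = 1 := by simpa [PySem.Str.len] using hl1
      cases hl : r.toList with
      | nil => rw [hl] at h2; simp at h2
      | cons a t =>
        cases t with
        | nil => simp
        | cons b t2 => rw [hl] at h2; simp at h2
    rw [pv_foldl_grid (S.length : Int) ((pvM S : Nat) : Int)
      (fun bd i j => if pvCellEqStr (pvGet2 bd i j) r then
        if pvACheck (S.length : Int) ((pvM S : Nat) : Int) i j (pvBoardOf S X.1 X.2) then
          pvSet2 bd i j PCell.zero
        else bd
      else bd) (pvBoardOf S X.1 X.2)]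
    rw [hgr]
    rw [pv_index_getD S hlen (r.toList.headD ' ')]
    obtain ⟨e2, hI2⟩ := pv_pass2 S (r.toList.headD ' ') r hc X.1 X.2 hI1 (pvGrid S) X.1
      (pv_grid_nodup S) (fun p hp => (pv_mem_grid S p).mp hp) hI1
    rw [e2]
    exact ⟨rfl, hI2⟩
  · rw [if_neg hl1]
    rw [if_neg hl1]
    have hc : (String.ofList [(PySem.Str.pyGet? r 0).getD ' ']).toList
        = [(PySem.Str.pyGet? r 0).getD ' '] := String.toList_ofList
    rw [pv_foldl_grid (S.length : Int) ((pvM S : Nat) : Int)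
      (fun bd i j => if pvCellEqStr (pvGet2 bd i j)
          (String.ofList [(PySem.Str.pyGet? r 0).getD ' ']) then
        if pvACheck (S.length : Int) ((pvM S : Nat) : Int) i j (pvBoardOf S X.1 X.2) then
          pvSet2 bd i j PCell.zero
        else pvSet2 bd i j PCell.neg
      else bd) (pvBoardOf S X.1 X.2)]
    rw [hgr]
    rw [pv_index_getD S hlen ((PySem.Str.pyGet? r 0).getD ' ')]
    obtain ⟨e3, hI3⟩ := pv_pass3 S ((PySem.Str.pyGet? r 0).getD ' ')
      (String.ofList [(PySem.Str.pyGet? r 0).getD ' ']) hc X.1 X.2 hI1 (pvGrid S) X.1 X.2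
      (pv_grid_nodup S) (fun p hp => (pv_mem_grid S p).mp hp) hI1
    rw [e3]
    exact ⟨rfl, hI3⟩

lemma pv_requests (S : List String) (hlen : ∀ s ∈ S, pvM S ≤ s.toList.length) :
    ∀ (reqs : List String) (Z M : PySem.Set (Int × Int)), (∀ r ∈ reqs, r ≠ "") → pvSInv S Z M →
    (reqs.foldl (pvAStep (S.length : Int) ((pvM S : Nat) : Int)) (pvBoardOf S Z M)
      = pvBoardOf S (reqs.foldl (pvBStep (S.length : Int) ((pvM S : Nat) : Int) (pvIndex S)) (Z, M)).1
          (reqs.foldl (pvBStep (S.length : Int) ((pvM S : Nat) : Int) (pvIndex S)) (Z, M)).2)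
    ∧ pvSInv S (reqs.foldl (pvBStep (S.length : Int) ((pvM S : Nat) : Int) (pvIndex S)) (Z, M)).1
        (reqs.foldl (pvBStep (S.length : Int) ((pvM S : Nat) : Int) (pvIndex S)) (Z, M)).2 := by
  intro reqs
  induction reqs with
  | nil => intro Z M _ hI; exact ⟨rfl, hI⟩
  | cons r reqs ih =>
    intro Z M hnz hI
    have hr : r ≠ "" := hnz r (List.mem_cons_self ..)
    have hnz2 : ∀ q ∈ reqs, q ≠ "" := fun q hq => hnz q (List.mem_cons_of_mem _ hq)
    simp only [List.foldl_cons]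
    obtain ⟨e, hI2⟩ := pv_step S hlen r hr Z M hI
    rw [e]
    exact ih (pvBStep (S.length : Int) ((pvM S : Nat) : Int) (pvIndex S) (Z, M) r).1
      (pvBStep (S.length : Int) ((pvM S : Nat) : Int) (pvIndex S) (Z, M) r).2 hnz2 hI2

lemma pv_foldl_sub (l : List (List PCell)) (t : Int) :
    l.foldl (fun a st =>
        a - (PySem.List.count st PCell.zero : Int) - (PySem.List.count st PCell.neg : Int)) t
      = t - (l.map (fun st =>
          (PySem.List.count st PCell.zero : Int) + (PySem.List.count st PCell.neg : Int))).sum := by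
  induction l generalizing t with
  | nil => simp
  | cons h tl ih => simp only [List.foldl_cons, List.map_cons, List.sum_cons, ih]; ring

lemma pv_count_row_zero (S : List String) (Z M : List (Int × Int)) (k : Nat)
    (_hI : pvSInv S Z M) :
    (PySem.List.count (pvRowOf S Z M k) PCell.zero : Int)
      = ((List.range (pvM S)).countP (fun j : Nat => decide (((k : Int), (j : Int)) ∈ Z)) : Int) := by
  unfold pvRowOf
  rw [PySem.List.count_eq, List.count_append]
  have hsuf : (List.map PCell.ch ((S.getD k "").toList.drop (pvM S))).count PCell.zero = 0 := by
    rw [List.count_eq_zero]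
    intro hmem
    rw [List.mem_map] at hmem
    obtain ⟨x, _, hx⟩ := hmem
    exact PCell.noConfusion hx
  rw [hsuf]
  rw [List.count_eq_countP, List.countP_map]
  congr 1
  rw [Nat.add_zero]
  apply List.countP_congr
  intro j _
  simp only [Function.comp_apply]
  have hiff := pv_cell_zero_iff S Z M ((k : Int), (j : Int))
  rw [Bool.eq_iff_iff]
  simp only [beq_iff_eq, decide_eq_true_eq, hiff, iff_true]

lemma pv_count_row_neg (S : List String) (Z M : List (Int × Int)) (k : Nat)
    (hI : pvSInv S Z M) :
    (PySem.List.count (pvRowOf S Z M k) PCell.neg : Int)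
      = ((List.range (pvM S)).countP (fun j : Nat => decide (((k : Int), (j : Int)) ∈ M)) : Int) := by
  unfold pvRowOf
  rw [PySem.List.count_eq, List.count_append]
  have hsuf : (List.map PCell.ch ((S.getD k "").toList.drop (pvM S))).count PCell.neg = 0 := by
    rw [List.count_eq_zero]
    intro hmem
    rw [List.mem_map] at hmem
    obtain ⟨x, _, hx⟩ := hmem
    exact PCell.noConfusion hx
  rw [hsuf]
  rw [List.count_eq_countP, List.countP_map]
  congr 1
  rw [Nat.add_zero]
  apply List.countP_congr
  intro j _
  simp only [Function.comp_apply]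
  have hiff := pv_cell_neg_iff S Z M ((k : Int), (j : Int))
    (fun hM hZ => (hI.2.2.1 _ hZ).2 hM)
  rw [Bool.eq_iff_iff]
  simp only [beq_iff_eq, decide_eq_true_eq, hiff, iff_true]

lemma pv_card_eq (S : List String) (Z : List (Int × Int)) (hnd : Z.Nodup)
    (hg : ∀ p ∈ Z, pvInGrid S p) :
    Z.length = ((List.range S.length).map
      (fun k : Nat => (List.range (pvM S)).countP (fun j : Nat => decide (((k : Int), (j : Int)) ∈ Z)))).sum := by
  have hperm : ((pvGrid S).filter (fun p => decide (p ∈ Z))).Perm Z := by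
    refine (List.perm_ext_iff_of_nodup ((pv_grid_nodup S).filter _) hnd).mpr ?_
    intro q
    simp only [List.mem_filter, decide_eq_true_eq, pv_mem_grid]
    exact ⟨fun h => h.2, fun h => ⟨hg q h, h⟩⟩
  rw [← hperm.length_eq]
  rw [pvGrid, List.filter_flatMap, List.length_flatMap]
  rw [PySem.List.pyRange_one 0 (S.length : Int)]
  simp only [sub_zero, Int.toNat_natCast, List.map_map]
  congr 1
  apply List.map_congr_left
  intro k _
  simp only [Function.comp_apply, zero_add]
  rw [PySem.List.pyRange_one 0 ((pvM S : Nat) : Int)]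
  simp only [sub_zero, Int.toNat_natCast, List.map_map, List.filter_map, List.length_map]
  rw [← List.countP_eq_length_filter]
  apply List.countP_congr
  intro j _
  simp

lemma pv_count_final (S : List String) (Z M : List (Int × Int)) (hI : pvSInv S Z M) (t : Int) :
    (pvBoardOf S Z M).foldl (fun a st =>
        a - (PySem.List.count st PCell.zero : Int) - (PySem.List.count st PCell.neg : Int)) t
      = t - Z.length - M.length := by
  rw [pv_foldl_sub]
  have hz := pv_card_eq S Z hI.1 (fun p hp => (hI.2.2.1 p hp).1)
  have hm := pv_card_eq S M hI.2.1 hI.2.2.2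
  have hrow : ∀ k ∈ List.range S.length,
      ((PySem.List.count (pvRowOf S Z M k) PCell.zero : Int) +
        (PySem.List.count (pvRowOf S Z M k) PCell.neg : Int))
      = (((List.range (pvM S)).countP (fun j : Nat => decide (((k : Int), (j : Int)) ∈ Z)) : Int) +
         ((List.range (pvM S)).countP (fun j : Nat => decide (((k : Int), (j : Int)) ∈ M)) : Int)) := by
    intro k _
    rw [pv_count_row_zero S Z M k hI, pv_count_row_neg S Z M k hI]
  simp only [pvBoardOf, List.map_map]
  have hmap : List.map ((fun st =>
        (PySem.List.count st PCell.zero : Int) + (PySem.List.count st PCell.neg : Int))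
          ∘ pvRowOf S Z M) (List.range S.length)
      = List.map (fun k : Nat =>
          (((List.range (pvM S)).countP (fun j : Nat => decide (((k : Int), (j : Int)) ∈ Z))) : Int) +
          (((List.range (pvM S)).countP (fun j : Nat => decide (((k : Int), (j : Int)) ∈ M))) : Int))
        (List.range S.length) :=
    List.map_congr_left (fun k hk => hrow k hk)
  rw [hmap]
  rw [PySem.List.sum_map_add_int]
  have hzc : ((List.range S.length).map
      (fun k : Nat => (((List.range (pvM S)).countP (fun j : Nat => decide (((k : Int), (j : Int)) ∈ Z))) : Int))).sum
      = (Z.length : Int) := by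
    rw [hz]; push_cast [List.map_map]; rfl
  have hmc : ((List.range S.length).map
      (fun k : Nat => (((List.range (pvM S)).countP (fun j : Nat => decide (((k : Int), (j : Int)) ∈ M))) : Int))).sum
      = (M.length : Int) := by
    rw [hm]; push_cast [List.map_map]; rfl
  rw [hzc, hmc]
  ring

lemma pv_board_init (S : List String) (hlen : ∀ s ∈ S, pvM S ≤ s.toList.length) :
    S.foldl (fun b st => b ++ [st.toList.foldl (fun li s => li ++ [PCell.ch s]) []]) []
      = pvBoardOf S [] [] := by
  rw [PySem.List.foldl_append_singleton_eq_map, List.nil_append]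
  unfold pvBoardOf
  apply List.ext_getElem
  · simp
  intro k hk hk'
  rw [List.length_map] at hk
  rw [List.getElem_map]
  conv_rhs => rw [List.getElem_map, List.getElem_range]
  rw [PySem.List.foldl_append_singleton_eq_map, List.nil_append]
  unfold pvRowOf
  have hgd : S.getD k "" = S[k] := List.getD_eq_getElem S "" hk
  have hle : pvM S ≤ S[k].toList.length := hlen S[k] (List.getElem_mem hk)
  have hpre : (List.range (pvM S)).map (fun j : Nat => pvCellOf S [] [] ((k : Int), (j : Int)))
      = (S[k].toList.take (pvM S)).map PCell.ch := by
    apply List.ext_getElem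
    · simp only [List.length_map, List.length_range, List.length_take]
      omega
    intro j hj hj'
    rw [List.length_map, List.length_range] at hj
    rw [List.getElem_map, List.getElem_range, List.getElem_map, List.getElem_take]
    simp only [pvCellOf, List.not_mem_nil, if_false]
    congr 1
    simp only [pvCharAt, Int.toNat_natCast, hgd]
    exact List.getD_eq_getElem _ ' ' (by omega)
  rw [hpre, hgd, ← List.map_append, List.take_append_drop]

-- ===== VERDICT (by name: the statement is the Claim_ definition above) =====
theorem solution_spec : Claim_equal_solution := by
  unfold Claim_equal_solution Spec_solution
  intro S R _hdom hpre
  obtain ⟨hne, hpre2⟩ := hpre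
  unfold solution solution_alt
  have hmm : PySem.Str.len (PySem.List.pyGetD S 0 "") = ((pvM S : Nat) : Int) := by
    have h0 : PySem.List.pyGetD S 0 "" = S.headD "" := by
      cases S with
      | nil => rfl
      | cons a t => exact PySem.List.pyGetD_zero_cons a t ""
    rw [h0]
    rfl
  rw [hmm]
  rcases hpre2 with rfl | ⟨hlen0, hnz⟩
  · -- no requests: the board stays all characters and the answer is n*m on both sides
    have e0 : (S.foldl (fun b st => b ++ [st.toList.foldl (fun li s => li ++ [PCell.ch s]) []]) []).foldl
        (fun a st =>
          a - (PySem.List.count st PCell.zero : Int) - (PySem.List.count st PCell.neg : Int))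
        (PySem.List.len S * ((pvM S : Nat) : Int))
        = PySem.List.len S * ((pvM S : Nat) : Int)
          - PySem.Set.len (PySem.Set.empty : PySem.Set (Int × Int))
          - PySem.Set.len (PySem.Set.empty : PySem.Set (Int × Int)) := by
      rw [PySem.List.foldl_append_singleton_eq_map, List.nil_append]
      rw [pv_foldl_sub]
      have hmap : (S.map (fun st => st.toList.foldl (fun li s => li ++ [PCell.ch s]) [])).map
          (fun st =>
            (PySem.List.count st PCell.zero : Int) + (PySem.List.count st PCell.neg : Int))
          = S.map (fun _ => (0 : Int)) := by
        rw [List.map_map]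
        apply List.map_congr_left
        intro st _
        simp only [Function.comp_apply]
        rw [PySem.List.foldl_append_singleton_eq_map, List.nil_append]
        have h1 : (st.toList.map PCell.ch).count PCell.zero = 0 :=
          List.count_eq_zero.mpr (by simp)
        have h2 : (st.toList.map PCell.ch).count PCell.neg = 0 :=
          List.count_eq_zero.mpr (by simp)
        rw [PySem.List.count_eq, PySem.List.count_eq, h1, h2]
        simp
      rw [hmap]
      have hsum : (S.map (fun _ => (0 : Int))).sum = 0 := by
        simp
      rw [hsum]
      simp [PySem.Set.len, PySem.Set.empty, PySem.List.len_eq]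
    exact e0
  · have hlen : ∀ s ∈ S, pvM S ≤ s.toList.length := fun s hs => hlen0 s hs
    have hb : S.foldl (fun b st => b ++ [st.toList.foldl (fun li s => li ++ [PCell.ch s]) []]) []
        = pvBoardOf S PySem.Set.empty PySem.Set.empty := pv_board_init S hlen
    obtain ⟨e, hIf⟩ := pv_requests S hlen R PySem.Set.empty PySem.Set.empty hnz
      ⟨List.nodup_nil, List.nodup_nil, by simp [PySem.Set.empty], by simp [PySem.Set.empty]⟩
    have final : (R.foldl (pvAStep (S.length : Int) ((pvM S : Nat) : Int))
          (S.foldl (fun b st => b ++ [st.toList.foldl (fun li s => li ++ [PCell.ch s]) []]) [])).foldl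
        (fun a st =>
          a - (PySem.List.count st PCell.zero : Int) - (PySem.List.count st PCell.neg : Int))
        (PySem.List.len S * ((pvM S : Nat) : Int))
        = PySem.List.len S * ((pvM S : Nat) : Int)
          - PySem.Set.len (R.foldl (pvBStep (S.length : Int) ((pvM S : Nat) : Int) (pvIndex S))
              (PySem.Set.empty, PySem.Set.empty)).1
          - PySem.Set.len (R.foldl (pvBStep (S.length : Int) ((pvM S : Nat) : Int) (pvIndex S))
              (PySem.Set.empty, PySem.Set.empty)).2 := by
      rw [hb, e, pv_count_final S _ _ hIf]
      simp [PySem.Set.len, PySem.List.len_eq]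
    exact final
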